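-- pv_equiv track=rewrite | github.com/blakeaustin/connections_wedding | MainPage.py | has_common_thread
-- ===== SOURCE A (Python) =====
-- def has_common_thread(selected_words):
--
--     list1 = ["Oso","Judge","Line","Baptist"] #Related to Baylor University
--     list2 = ["The Old","Palos Verdes","Vaquero","Livestock"] #Related to Rancho
--     list3 = ["Gourd","Fest","Harvest","Spooky"] #Related to October
--     list4 = ["Lively","Daphne","Shelton","William"] #Famous 'Blakes'
--
--
--     for words in [list1, list2, list3, list4]:
--         if all(word in words for word in selected_words):
--             return True
--     return False
-- ===== SOURCE B (Python) =====
-- # B: precomputed word->category dict + single early-exit pass tracking the category seen so far.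
-- _LISTS = [
--     ["Oso", "Judge", "Line", "Baptist"],      # Related to Baylor University
--     ["The Old", "Palos Verdes", "Vaquero", "Livestock"],  # Related to Rancho
--     ["Gourd", "Fest", "Harvest", "Spooky"],   # Related to October
--     ["Lively", "Daphne", "Shelton", "William"],  # Famous 'Blakes'
-- ]
-- _CATEGORY = {w: i for i, ws in enumerate(_LISTS) for w in ws}
--
--
-- def has_common_thread(selected_words):
--     cat = None
--     for w in selected_words:
--         c = _CATEGORY.get(w)
--         if c is None:
--             return False
--         if cat is not None and c != cat:
--             return False
--         cat = c
--     return True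
-- ===== Notes on version B (the rewrite author's own statement) =====
-- stated objective: idiomatic
-- what changed: Replaces the outer loop over the four candidate lists (each re-scanning all selected words with a list membership test) by a precomputed word-to-category dict and one early-exit pass over selected_words that fails on an unknown word or a second distinct category.
import Mathlib
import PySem

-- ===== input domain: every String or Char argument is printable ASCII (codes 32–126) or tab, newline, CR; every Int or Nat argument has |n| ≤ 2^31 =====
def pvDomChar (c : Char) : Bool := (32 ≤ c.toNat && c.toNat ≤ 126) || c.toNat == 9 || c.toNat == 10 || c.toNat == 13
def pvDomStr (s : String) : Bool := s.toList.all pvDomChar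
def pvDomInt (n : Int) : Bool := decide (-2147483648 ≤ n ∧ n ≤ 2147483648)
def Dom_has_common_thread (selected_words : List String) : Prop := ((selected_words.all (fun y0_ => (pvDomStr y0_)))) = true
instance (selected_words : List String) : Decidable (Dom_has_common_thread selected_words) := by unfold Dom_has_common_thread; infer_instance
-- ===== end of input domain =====

-- B replaces the loop over the four candidate lists by a precomputed word→category dict and one early-exit pass; objective: idiomatic.

-- ===== PORT A =====
-- the early-return 'for words in [list1, list2, list3, list4]' loop of A
def pvLoopA (selected_words : List String) (lists : List (List String)) : Bool :=
  match lists with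
  | [] => false
  | words :: rest =>
      if selected_words.all (fun word => words.contains word) then true
      else pvLoopA selected_words rest

def has_common_thread (selected_words : List String) : Bool :=
  pvLoopA selected_words
    [["Oso", "Judge", "Line", "Baptist"],
     ["The Old", "Palos Verdes", "Vaquero", "Livestock"],
     ["Gourd", "Fest", "Harvest", "Spooky"],
     ["Lively", "Daphne", "Shelton", "William"]]

-- ===== PORT B =====
-- the module-level dict _CATEGORY = {w: i for i, ws in enumerate(_LISTS) for w in ws}
def pvCategory : PySem.Dict String Int :=
  PySem.Dict.ofList
    ((PySem.List.enumerate
        [["Oso", "Judge", "Line", "Baptist"],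
         ["The Old", "Palos Verdes", "Vaquero", "Livestock"],
         ["Gourd", "Fest", "Harvest", "Spooky"],
         ["Lively", "Daphne", "Shelton", "William"]]).flatMap
      (fun p => p.2.map (fun w => (w, p.1))))

-- the 'for w in selected_words' loop of B, carrying 'cat'
def pvLoopB (cat : Option Int) (ws : List String) : Bool :=
  match ws with
  | [] => true
  | w :: rest =>
      match pvCategory.get? w with
      | none => false
      | some c =>
          match cat with
          | some c0 => if c ≠ c0 then false else pvLoopB (some c) rest
          | none => pvLoopB (some c) rest

def has_common_thread_alt (selected_words : List String) : Bool :=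
  pvLoopB none selected_words

-- ===== PRECONDITION & SPEC =====
def Spec_has_common_thread (selected_words : List String) (out : Bool) : Prop := out = has_common_thread_alt selected_words
instance (selected_words : List String) (out : Bool) : Decidable (Spec_has_common_thread selected_words out) := by unfold Spec_has_common_thread; infer_instance

-- ===== CLAIM (what is proved, stated in full; the proofs are below) =====
def Claim_equal_has_common_thread : Prop := ∀ (selected_words : List String), Dom_has_common_thread selected_words → Spec_has_common_thread selected_words (has_common_thread selected_words)

-- ===== LEMMAS AND PROOFS =====

-- the 16 words that occur in the four lists (proof-side helper)
def pvAllWords : List String :=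
  ["Oso", "Judge", "Line", "Baptist", "The Old", "Palos Verdes", "Vaquero", "Livestock",
   "Gourd", "Fest", "Harvest", "Spooky", "Lively", "Daphne", "Shelton", "William"]

-- pvCategory evaluated to its literal items
theorem pvCategory_eq : pvCategory = PySem.Dict.mk
    [("Oso", 0), ("Judge", 0), ("Line", 0), ("Baptist", 0),
     ("The Old", 1), ("Palos Verdes", 1), ("Vaquero", 1), ("Livestock", 1),
     ("Gourd", 2), ("Fest", 2), ("Harvest", 2), ("Spooky", 2),
     ("Lively", 3), ("Daphne", 3), ("Shelton", 3), ("William", 3)] := by decide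

theorem get?_none (w : String) (hw : w ∉ pvAllWords) : pvCategory.get? w = none := by
  rw [pvCategory_eq, PySem.Dict.get?_eq_none_iff_not_mem_keys]
  simpa [pvAllWords, PySem.Dict.keys] using hw

-- membership in list i equals a category-dict hit with value i
theorem contains0 (w : String) :
    (["Oso", "Judge", "Line", "Baptist"].contains w) = (pvCategory.get? w == some 0) := by
  by_cases hw : w ∈ pvAllWords
  · fin_cases hw <;> decide
  · rw [get?_none w hw]
    simp only [pvAllWords, List.mem_cons, not_or] at hw
    simp [hw.1, hw.2.1, hw.2.2.1, hw.2.2.2.1]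

theorem contains1 (w : String) :
    (["The Old", "Palos Verdes", "Vaquero", "Livestock"].contains w) = (pvCategory.get? w == some 1) := by
  by_cases hw : w ∈ pvAllWords
  · fin_cases hw <;> decide
  · rw [get?_none w hw]
    simp only [pvAllWords, List.mem_cons, not_or] at hw
    simp [hw.2.2.2.2.1, hw.2.2.2.2.2.1, hw.2.2.2.2.2.2.1, hw.2.2.2.2.2.2.2.1]

theorem contains2 (w : String) :
    (["Gourd", "Fest", "Harvest", "Spooky"].contains w) = (pvCategory.get? w == some 2) := by
  by_cases hw : w ∈ pvAllWords
  · fin_cases hw <;> decide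
  · rw [get?_none w hw]
    simp only [pvAllWords, List.mem_cons, not_or] at hw
    simp [hw.2.2.2.2.2.2.2.2.1, hw.2.2.2.2.2.2.2.2.2.1,
          hw.2.2.2.2.2.2.2.2.2.2.1, hw.2.2.2.2.2.2.2.2.2.2.2.1]

theorem contains3 (w : String) :
    (["Lively", "Daphne", "Shelton", "William"].contains w) = (pvCategory.get? w == some 3) := by
  by_cases hw : w ∈ pvAllWords
  · fin_cases hw <;> decide
  · rw [get?_none w hw]
    simp only [pvAllWords, List.mem_cons, not_or] at hw
    simp [hw.2.2.2.2.2.2.2.2.2.2.2.2.1, hw.2.2.2.2.2.2.2.2.2.2.2.2.2.1,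
          hw.2.2.2.2.2.2.2.2.2.2.2.2.2.2.1, hw.2.2.2.2.2.2.2.2.2.2.2.2.2.2.2]

-- the dict only ever yields 0,1,2,3
theorem get?_cases (w : String) :
    pvCategory.get? w = none ∨ pvCategory.get? w = some 0 ∨ pvCategory.get? w = some 1 ∨
    pvCategory.get? w = some 2 ∨ pvCategory.get? w = some 3 := by
  by_cases hw : w ∈ pvAllWords
  · fin_cases hw <;> decide
  · exact Or.inl (get?_none w hw)

-- once a category is fixed, B's loop is an 'all words hit that category' check
theorem pvLoopB_some (c : Int) (ws : List String) :
    pvLoopB (some c) ws = ws.all (fun w => pvCategory.get? w == some c) := by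
  induction ws generalizing c with
  | nil => rfl
  | cons w rest ih =>
      simp only [pvLoopB, List.all_cons]
      cases h : pvCategory.get? w with
      | none => simp
      | some c' =>
          by_cases hc : c' = c
          · subst hc; simp [ih]
          · simp [hc]

theorem agree (ws : List String) : has_common_thread ws = has_common_thread_alt ws := by
  cases ws with
  | nil => rfl
  | cons w rest =>
      show pvLoopA (w :: rest) _ = pvLoopB none (w :: rest)
      simp only [pvLoopA, List.all_cons, contains0, contains1, contains2, contains3, pvLoopB]
      rcases get?_cases w with h | h | h | h | h <;>
          simp [h, pvLoopB_some] <;>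
        · rw [Bool.eq_iff_iff]
          simp [List.all_eq_true]

-- ===== VERDICT (by name: the statement is the Claim_ definition above) =====
theorem has_common_thread_spec : Claim_equal_has_common_thread := by
  intro ws _
  exact agree ws
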